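-- pv_equiv track=rewrite | github.com/luisnguyen2k9-alt/LibraNCT | services.py | clean_book_text
-- ===== SOURCE A (Python) =====
-- def clean_book_text(raw_text):
--     """Clean and process OCR text for better book recognition"""
--     if not raw_text:
--         return ""
--
--     # Remove extra whitespace and normalize
--     text = ' '.join(raw_text.split())
--
--     # Remove common OCR artifacts
--     artifacts = [
--         '|', '||', '|||', '||||',  # Common OCR artifacts
--         '...', '....', '.....',     # Multiple dots
--         '---', '----', '-----',     # Multiple dashes
--         '___', '____', '_____',     # Multiple underscores
--     ]
--
--     for artifact in artifacts:
--         text = text.replace(artifact, ' ')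
--
--     # Clean up multiple spaces
--     text = ' '.join(text.split())
--
--     # Extract potential book information
--     lines = text.split('\n')
--     book_info = []
--
--     for line in lines:
--         line = line.strip()
--         if len(line) > 2:  # Ignore very short lines
--             # Check if line looks like book title or ID
--             if (len(line) > 5 and
--                 (line.isupper() or  # All caps (common for book IDs)
--                  any(char.isdigit() for char in line) or  # Contains numbers
--                  len(line.split()) >= 2)):  # Multiple words
--                 book_info.append(line)
--
--     # Return the most relevant text
--     if book_info:
--         # Prioritize longer text (likely book titles)
--         return max(book_info, key=len)
--     else:
--         # Return first non-empty line
--         return text.split('\n')[0].strip() if text else ""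
-- ===== SOURCE B (Python) =====
-- def clean_book_text(raw_text):
--     """Clean OCR text; the extraction loop in the original is dead code
--     (after normalization the text is a single stripped line), so B is just
--     normalize -> replace artifacts -> normalize."""
--     if not raw_text:
--         return ""
--     text = ' '.join(raw_text.split())
--     for artifact in ['|', '||', '|||', '||||',
--                      '...', '....', '.....',
--                      '---', '----', '-----',
--                      '___', '____', '_____']:
--         text = text.replace(artifact, ' ')
--     return ' '.join(text.split())
-- ===== Notes on version B (the rewrite author's own statement) =====
-- stated objective: simpler
-- what changed: B drops A's entire line-splitting/book_info extraction loop and its fallback, which are dead code: after the whitespace normalization the text is a single newline-free stripped line, so A always returns the normalized text itself.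
import Mathlib
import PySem

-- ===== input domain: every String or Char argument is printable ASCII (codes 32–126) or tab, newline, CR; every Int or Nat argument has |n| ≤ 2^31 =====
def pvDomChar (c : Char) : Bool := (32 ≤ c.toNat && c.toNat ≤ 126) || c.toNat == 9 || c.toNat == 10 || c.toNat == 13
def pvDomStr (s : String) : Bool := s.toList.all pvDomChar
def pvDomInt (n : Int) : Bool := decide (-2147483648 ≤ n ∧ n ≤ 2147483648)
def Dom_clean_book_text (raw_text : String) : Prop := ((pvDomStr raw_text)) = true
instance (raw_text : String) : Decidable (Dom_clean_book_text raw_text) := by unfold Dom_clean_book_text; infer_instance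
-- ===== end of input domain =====

-- B drops A's line-extraction loop, which is dead code after whitespace
-- normalization (objective: simpler; return value only, no side effects).

-- ===== PORT A =====

-- hand port of str.isupper(): at least one cased char and no lowercase one;
-- exact on the ASCII domain (where the cased characters are the letters)
def pvIsupper (s : String) : Bool :=
  s.toList.any PySem.Chars.isupper && s.toList.all (fun c => !PySem.Chars.islower c)

def clean_book_text (raw_text : String) : String :=
  if raw_text = "" then ""
  else
    let text := PySem.Str.join " " (PySem.Str.split₀ raw_text)
    let artifacts : List String :=
      ["|", "||", "|||", "||||",
       "...", "....", ".....",
       "---", "----", "-----",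
       "___", "____", "_____"]
    let text := artifacts.foldl (fun t a => PySem.Str.replace t a " ") text
    let text := PySem.Str.join " " (PySem.Str.split₀ text)
    -- text.split('\n'): sep ≠ "" so split? is always `some`
    let lines := (PySem.Str.split? text "\n").getD []
    let book_info := lines.foldl (fun acc line =>
      let line := PySem.Str.strip line
      if PySem.Str.len line > 2 then
        if PySem.Str.len line > 5 &&
           (pvIsupper line ||
            line.toList.any PySem.Chars.isdigit ||
            (PySem.Str.split₀ line).length ≥ 2) then
          acc ++ [line]
        else acc
      else acc) []
    if book_info ≠ [] then
      -- max(book_info, key=len); book_info ≠ [] so max? is always `some`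
      (PySem.List.max? book_info (fun l => PySem.Str.len l)).getD ""
    else
      -- text.split('\n')[0].strip() if text else "";  split never returns []
      if text ≠ "" then
        PySem.Str.strip (((PySem.Str.split? text "\n").getD []).headD "")
      else ""

-- ===== PORT B =====
def clean_book_text_alt (raw_text : String) : String :=
  if raw_text = "" then ""
  else
    let text := PySem.Str.join " " (PySem.Str.split₀ raw_text)
    let artifacts : List String :=
      ["|", "||", "|||", "||||",
       "...", "....", ".....",
       "---", "----", "-----",
       "___", "____", "_____"]
    let text := artifacts.foldl (fun t a => PySem.Str.replace t a " ") text
    PySem.Str.join " " (PySem.Str.split₀ text)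

-- ===== PRECONDITION & SPEC =====
def Spec_clean_book_text (raw_text : String) (out : String) : Prop := out = clean_book_text_alt raw_text
instance (raw_text : String) (out : String) : Decidable (Spec_clean_book_text raw_text out) := by unfold Spec_clean_book_text; infer_instance

-- ===== CLAIM (what is proved, stated in full; the proofs are below) =====
def Claim_equal_clean_book_text : Prop := ∀ (raw_text : String), Dom_clean_book_text raw_text → Spec_clean_book_text raw_text (clean_book_text raw_text)

-- ===== LEMMAS AND PROOFS =====

-- tokens produced by split() are nonempty and contain no whitespace
def pvTok (ws : List (List Char)) : Prop :=
  ∀ w ∈ ws, w ≠ [] ∧ ∀ c ∈ w, PySem.Chars.isspace c = false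

theorem pvSplit₀_go_tok (cs : List Char) :
    ∀ cur acc, (∀ c ∈ cur, PySem.Chars.isspace c = false) → pvTok acc →
    pvTok (PySem.Chars.split₀.go cs cur acc) := by
  induction cs with
  | nil =>
    intro cur acc hcur hacc
    simp only [PySem.Chars.split₀.go]
    split
    · intro w hw; exact hacc w (by simpa using hw)
    · intro w hw
      simp only [List.mem_reverse, List.mem_cons] at hw
      rcases hw with h | h
      · subst h
        constructor
        · rename_i hne; simp_all [List.isEmpty_iff]
        · intro c hc; exact hcur c (by simpa using hc)
      · exact hacc w h
  | cons c rest ih =>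
    intro cur acc hcur hacc
    simp only [PySem.Chars.split₀.go]
    split
    · split
      · exact ih [] acc (by simp) hacc
      · refine ih [] _ (by simp) ?_
        intro w hw
        simp only [List.mem_cons] at hw
        rcases hw with h | h
        · subst h
          refine ⟨by rename_i hne _; simp_all [List.isEmpty_iff], ?_⟩
          intro x hx; exact hcur x (by simpa using hx)
        · exact hacc w h
    · refine ih (c :: cur) acc ?_ hacc
      intro x hx
      rcases List.mem_cons.mp hx with h | h
      · subst h; rename_i hsp; simpa using hsp
      · exact hcur x h

theorem pvSplit₀_tok (cs : List Char) : pvTok (PySem.Chars.split₀ cs) :=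
  pvSplit₀_go_tok cs [] [] (by simp) (by intro w hw; simp at hw)

theorem pvJoin_no_newline (ws : List (List Char)) (h : pvTok ws) :
    '\n' ∉ PySem.Chars.join [' '] ws := by
  induction ws with
  | nil => simp [PySem.Chars.join_nil]
  | cons w rest ih =>
    have hw := h w (by simp)
    have hrest : pvTok rest := fun x hx => h x (by simp [hx])
    cases rest with
    | nil =>
      rw [PySem.Chars.join_singleton]
      intro hmem
      have := hw.2 '\n' hmem
      simp [PySem.Chars.isspace] at this
    | cons q qs =>
      rw [PySem.Chars.join_cons_cons]
      intro hmem
      simp only [List.mem_append, List.mem_singleton] at hmem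
      rcases hmem with (h1 | h2) | h3
      · have := hw.2 '\n' h1; simp [PySem.Chars.isspace] at this
      · simp at h2
      · exact ih hrest h3

theorem pvJoin_head (ws : List (List Char)) (h : pvTok ws) (hne : ws ≠ []) :
    ∃ c, (PySem.Chars.join [' '] ws).head? = some c ∧ PySem.Chars.isspace c = false := by
  cases ws with
  | nil => exact absurd rfl hne
  | cons w rest =>
    have hw := h w (by simp)
    obtain ⟨c, w', hwc⟩ := List.exists_cons_of_ne_nil hw.1
    refine ⟨c, ?_, hw.2 c (by simp [hwc])⟩
    cases rest with
    | nil => rw [PySem.Chars.join_singleton, hwc]; rfl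
    | cons q qs => rw [PySem.Chars.join_cons_cons, hwc]; simp

theorem pvJoin_last (ws : List (List Char)) (h : pvTok ws) (hne : ws ≠ []) :
    ∃ c, (PySem.Chars.join [' '] ws).getLast? = some c ∧ PySem.Chars.isspace c = false := by
  induction ws with
  | nil => exact absurd rfl hne
  | cons w rest ih =>
    have hw := h w (by simp)
    have hrest : pvTok rest := fun x hx => h x (by simp [hx])
    cases rest with
    | nil =>
      rw [PySem.Chars.join_singleton]
      obtain ⟨c, hc⟩ := List.getLast?_isSome.mpr hw.1 |> Option.isSome_iff_exists.mp
      exact ⟨c, hc, hw.2 c (List.mem_of_getLast? hc)⟩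
    | cons q qs =>
      obtain ⟨c, hc, hcs⟩ := ih hrest (by simp)
      refine ⟨c, ?_, hcs⟩
      rw [PySem.Chars.join_cons_cons]
      rw [List.getLast?_append_of_ne_nil]
      · exact hc
      · intro hnil
        have hq := hrest q (by simp)
        cases qs with
        | nil => rw [PySem.Chars.join_singleton] at hnil; exact hq.1 hnil
        | cons r rs =>
          rw [PySem.Chars.join_cons_cons] at hnil
          rcases List.append_eq_nil_iff.mp hnil with ⟨h1, _⟩
          rcases List.append_eq_nil_iff.mp h1 with ⟨_, h2⟩
          simp at h2

theorem pvLstrip_eq_self (l : List Char) (h : ∀ c, l.head? = some c → PySem.Chars.isspace c = false) :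
    PySem.Chars.lstrip l = l := by
  cases l with
  | nil => rfl
  | cons c r =>
    have := h c rfl
    simp [PySem.Chars.lstrip, this]

theorem pvRstrip_eq_self (l : List Char) (h : ∀ c, l.getLast? = some c → PySem.Chars.isspace c = false) :
    PySem.Chars.rstrip l = l := by
  rw [PySem.Chars.rstrip]
  rcases hrev : l.reverse with _ | ⟨c, r⟩
  · simpa using congrArg List.reverse hrev
  · have hc : l.getLast? = some c := by
      rw [← List.head?_reverse, hrev]; rfl
    have := h c hc
    rw [List.dropWhile_cons]
    simp only [this, Bool.false_eq_true, if_false]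
    rw [← hrev, List.reverse_reverse]

theorem pvJoin_strip (ws : List (List Char)) (h : pvTok ws) :
    PySem.Chars.strip (PySem.Chars.join [' '] ws) = PySem.Chars.join [' '] ws := by
  rcases eq_or_ne ws [] with rfl | hne
  · rfl
  · obtain ⟨ch, hch, hchs⟩ := pvJoin_head ws h hne
    obtain ⟨cl, hcl, hcls⟩ := pvJoin_last ws h hne
    rw [PySem.Chars.strip, pvLstrip_eq_self _ (fun c hc => by rw [hch] at hc; cases hc; exact hchs)]
    exact pvRstrip_eq_self _ (fun c hc => by rw [hcl] at hc; cases hc; exact hcls)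

theorem pvSplitOn_go_no_sep (fuel : Nat) :
    ∀ (l cur : List Char) (acc : List (List Char)), l.length < fuel → '\n' ∉ l →
    PySem.Chars.splitOn.go ['\n'] fuel l cur acc = ((cur.reverse ++ l) :: acc).reverse := by
  induction fuel with
  | zero => intro l cur acc h; exact absurd h (by omega)
  | succ n ih =>
    intro l cur acc hlen hmem
    cases l with
    | nil => simp [PySem.Chars.splitOn.go]
    | cons c rest =>
      have hc : c ≠ '\n' := fun h => hmem (by simp [h])
      have hpre : List.isPrefixOf ['\n'] (c :: rest) = false := by
        simp [List.isPrefixOf]; exact fun h => absurd h.symm hc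
      rw [PySem.Chars.splitOn.go]
      simp only [hpre, Bool.false_eq_true, if_false]
      rw [ih rest (c :: cur) acc (by simpa using Nat.lt_of_succ_lt_succ hlen)
        (fun h => hmem (by simp [h]))]
      simp

theorem pvSplitOn_no_sep (cs : List Char) (h : '\n' ∉ cs) :
    PySem.Chars.splitOn cs ['\n'] = [cs] := by
  rw [PySem.Chars.splitOn, pvSplitOn_go_no_sep (cs.length + 1) cs [] [] (by omega) h]
  simp

theorem pvT_toList (y : String) :
    (PySem.Str.join " " (PySem.Str.split₀ y)).toList
      = PySem.Chars.join [' '] (PySem.Chars.split₀ y.toList) := by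
  simp [PySem.Str.join, PySem.Str.split₀, List.map_map, Function.comp_def]

theorem pvSplitStr (T : String) (h : '\n' ∉ T.toList) :
    PySem.Str.split? T "\n" = some [T] := by
  have hn : ("\n" : String).toList = ['\n'] := by decide
  simp [PySem.Str.split?, PySem.Chars.split?, hn, pvSplitOn_no_sep T.toList h,
    String.ofList_toList]

theorem pvStripStr (T : String) (h : PySem.Chars.strip T.toList = T.toList) :
    PySem.Str.strip T = T := by
  rw [PySem.Str.strip, h, String.ofList_toList]

-- the extraction loop of A is the identity on a whitespace-normalized text
theorem pvTail (y : String) :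
    (let text := PySem.Str.join " " (PySem.Str.split₀ y)
     let lines := (PySem.Str.split? text "\n").getD []
     let book_info := lines.foldl (fun acc line =>
       let line := PySem.Str.strip line
       if PySem.Str.len line > 2 then
         if PySem.Str.len line > 5 &&
            (pvIsupper line ||
             line.toList.any PySem.Chars.isdigit ||
             (PySem.Str.split₀ line).length ≥ 2) then
           acc ++ [line]
         else acc
       else acc) []
     if book_info ≠ [] then
       (PySem.List.max? book_info (fun l => PySem.Str.len l)).getD ""
     else
       if text ≠ "" then
         PySem.Str.strip (((PySem.Str.split? text "\n").getD []).headD "")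
       else "")
    = PySem.Str.join " " (PySem.Str.split₀ y) := by
  have htok : pvTok (PySem.Chars.split₀ y.toList) := pvSplit₀_tok _
  have hT := pvT_toList y
  have hnl : '\n' ∉ (PySem.Str.join " " (PySem.Str.split₀ y)).toList := by
    rw [hT]; exact pvJoin_no_newline _ htok
  have hsplit := pvSplitStr _ hnl
  have hstrip : PySem.Str.strip (PySem.Str.join " " (PySem.Str.split₀ y))
      = PySem.Str.join " " (PySem.Str.split₀ y) := by
    apply pvStripStr
    rw [hT]; exact pvJoin_strip _ htok
  simp only [hsplit, Option.getD_some, List.foldl_cons, List.foldl_nil, hstrip]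
  simp only [List.nil_append]
  split_ifs <;> simp_all [PySem.List.max?]

-- ===== VERDICT (by name: the statement is the Claim_ definition above) =====
theorem clean_book_text_spec : Claim_equal_clean_book_text := by
  intro raw_text _
  unfold Spec_clean_book_text clean_book_text clean_book_text_alt
  by_cases hraw : raw_text = ""
  · simp [hraw]
  · simp only [hraw, if_false]
    exact pvTail _
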